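-- pv_equiv track=rewrite | github.com/hanbyeolkang/DE7 | 0_코딩테스트/자동완성.py | solution
-- ===== SOURCE A (Python) =====
-- def solution(words):
--     words.sort()
--
--     prefix_set = set()
--     for i in range(1, len(words)):
--         w1, w2 = words[i-1], words[i]
--         for j in range(1, min(len(w1), len(w2))+1):
--             if w1[:j] == w2[:j]:
--                 prefix_set.add(w1[:j])
--             else:
--                 break;
--
--     answer = 0
--     for w in words:
--         for i in range(1, len(w)+1):
--             answer += 1
--             if w[:i] not in prefix_set:
--                 break;
--
--     return answer
-- ===== SOURCE B (Python) =====
-- def solution(words):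
--     count = {}
--     for w in words:
--         for i in range(1, len(w) + 1):
--             p = w[:i]
--             count[p] = count.get(p, 0) + 1
--     total = 0
--     for w in words:
--         k = len(w)
--         for i in range(1, len(w) + 1):
--             if count[w[:i]] == 1:
--                 k = i
--                 break
--         total += k
--     return total
-- ===== Notes on version B (the rewrite author's own statement) =====
-- stated objective: alternative
-- what changed: Replaces A's sort + adjacent-pair shared-prefix set with an unsorted one-pass prefix counter: each word's keystrokes are the first prefix length whose count is 1 (else the full length), so no sorting and no neighbour comparison.
import Mathlib
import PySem

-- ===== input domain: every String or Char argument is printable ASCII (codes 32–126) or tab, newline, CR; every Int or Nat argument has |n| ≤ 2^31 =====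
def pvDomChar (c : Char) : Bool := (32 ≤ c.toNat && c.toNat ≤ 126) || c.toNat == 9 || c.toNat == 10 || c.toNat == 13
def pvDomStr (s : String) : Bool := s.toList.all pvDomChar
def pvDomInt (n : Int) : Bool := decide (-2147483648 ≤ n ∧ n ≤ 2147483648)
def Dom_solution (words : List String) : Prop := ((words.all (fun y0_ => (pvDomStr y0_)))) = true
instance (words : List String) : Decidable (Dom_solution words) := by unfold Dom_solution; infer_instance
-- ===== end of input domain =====

-- B replaces A's sort + adjacent-pair shared-prefix set with an unsorted one-pass prefix
-- counter (alternative algorithm, similar cost). A sorts `words` in place; B does not mutate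
-- its argument — the equivalence proved here is about the RETURN value only.

-- ===== PORT A =====
-- inner loop "for j in range(1, min(len(w1),len(w2))+1): if w1[:j]==w2[:j]: add else break";
-- range(1, m+1) is ported as List.range' 1 m (bounds are nonnegative Nats, exact) and the
-- slice w[:j] (0 ≤ j) as List.take j on the character list (exact).
def pvInnerA (w1 w2 : List Char) (s : PySem.Set (List Char)) : List Nat → PySem.Set (List Char)
  | [] => s
  | j :: js => if w1.take j = w2.take j then pvInnerA w1 w2 (s.add (w1.take j)) js else s

-- outer loop "for i in range(1, len(words))" over adjacent pairs words[i-1], words[i],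
-- ported as structural recursion on the (sorted) list of words
def pvBuildA : PySem.Set (List Char) → List (List Char) → PySem.Set (List Char)
  | s, w1 :: w2 :: rest =>
      pvBuildA (pvInnerA w1 w2 s (List.range' 1 (min w1.length w2.length))) (w2 :: rest)
  | s, _ => s

-- "for i in range(1, len(w)+1): answer += 1; if w[:i] not in prefix_set: break"
def pvCostA (ps : PySem.Set (List Char)) (w : List Char) : List Nat → Int
  | [] => 0
  | i :: is => if w.take i ∈ ps then 1 + pvCostA ps w is else 1

def solution (words : List String) : Int :=
  let ws := PySem.List.sorted words id false   -- words.sort()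
  let ps := pvBuildA PySem.Set.empty (ws.map String.toList)
  ws.foldl (fun ans w => ans + pvCostA ps w.toList (List.range' 1 w.toList.length)) 0

-- ===== PORT B =====
-- "for i in range(1, len(w)+1): p = w[:i]; count[p] = count.get(p, 0) + 1"
def pvCountB (d : PySem.Dict (List Char) Int) (w : List Char) : PySem.Dict (List Char) Int :=
  (List.range' 1 w.length).foldl (fun d i => d.modify (w.take i) 0 (· + 1)) d

-- "k = len(w); for i in range(1, len(w)+1): if count[w[:i]] == 1: k = i; break".
-- count[w[:i]] is ported as getD _ 0: the key is always present (w itself was counted).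
def pvFirstB (d : PySem.Dict (List Char) Int) (w : List Char) : List Nat → Int
  | [] => (w.length : Int)
  | i :: is => if d.getD (w.take i) 0 == 1 then (i : Int) else pvFirstB d w is

def solution_alt (words : List String) : Int :=
  let d := words.foldl (fun d w => pvCountB d w.toList) PySem.Dict.empty
  words.foldl (fun tot w => tot + pvFirstB d w.toList (List.range' 1 w.toList.length)) 0

-- ===== PRECONDITION & SPEC =====
def Spec_solution (words : List String) (out : Int) : Prop := out = solution_alt words
instance (words : List String) (out : Int) : Decidable (Spec_solution words out) := by unfold Spec_solution; infer_instance

-- ===== CLAIM (what is proved, stated in full; the proofs are below) =====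
def Claim_equal_solution : Prop := ∀ (words : List String), Dom_solution words → Spec_solution words (solution words)

-- ===== LEMMAS AND PROOFS =====

-- number of words having p as a prefix
def pvCnt (p : List Char) (lws : List (List Char)) : Nat :=
  List.countP (fun w => decide (p <+: w)) lws

theorem pv_foldl_foldl_flatMap {α β δ : Type} (g : δ → β → δ) (h : α → List β) :
    ∀ (l : List α) (d : δ),
      List.foldl (fun d w => List.foldl g d (h w)) d l = List.foldl g d (l.flatMap h) := by
  intro l
  induction l with
  | nil => intro d; rfl
  | cons a t ih => intro d; simp [List.flatMap_cons, List.foldl_append, ih]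

theorem pv_sum_ite_eq_countP {α : Type} (q : α → Bool) (l : List α) :
    (l.map (fun x => if q x then 1 else 0)).sum = l.countP q := by
  induction l with
  | nil => rfl
  | cons a t ih => cases hq : q a <;> simp [hq, ih, Nat.add_comm]

theorem pv_count_prefixes (w p : List Char) :
    List.count p ((List.range' 1 w.length).map (fun i => w.take i))
      = if p ≠ [] ∧ p <+: w then 1 else 0 := by
  rw [List.count_eq_countP, List.countP_map]
  by_cases h : p ≠ [] ∧ p <+: w
  · obtain ⟨hne, hpre⟩ := h
    have h1 : 0 < p.length := List.length_pos_of_ne_nil hne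
    have h2 : p.length ≤ w.length := hpre.length_le
    have hc : List.countP ((fun x => x == p) ∘ fun i => w.take i) (List.range' 1 w.length)
        = List.countP (fun i => i == p.length) (List.range' 1 w.length) := by
      apply List.countP_congr
      intro i hi
      rw [List.mem_range'_1] at hi
      simp only [Function.comp, beq_iff_eq]
      constructor
      · intro ht
        have hl := congrArg List.length ht
        rw [List.length_take] at hl
        omega
      · intro ht; subst ht
        exact (List.prefix_iff_eq_take.mp hpre).symm
    rw [hc, ← List.count_eq_countP,
      List.count_eq_one_of_mem List.nodup_range' (by rw [List.mem_range'_1]; omega)]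
    simp [hne, hpre]
  · rw [if_neg h, List.countP_eq_zero]
    intro i hi
    rw [List.mem_range'_1] at hi
    simp only [Function.comp, beq_iff_eq]
    intro ht
    apply h
    refine ⟨?_, ?_⟩
    · rw [← ht]
      apply List.ne_nil_of_length_pos
      rw [List.length_take]
      omega
    · rw [← ht]; exact List.take_prefix i w

theorem pv_getD_built (words : List String) (p : List Char) (hp : p ≠ []) :
    (words.foldl (fun d w => pvCountB d w.toList) PySem.Dict.empty).getD p 0
      = (pvCnt p (words.map String.toList) : Int) := by
  have hstep : (fun (d : PySem.Dict (List Char) Int) (w : String) => pvCountB d w.toList)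
      = fun d w => List.foldl (fun d k => d.modify k 0 (· + 1)) d
          ((List.range' 1 w.toList.length).map (fun i => w.toList.take i)) := by
    funext d w
    rw [List.foldl_map]
    rfl
  rw [hstep, pv_foldl_foldl_flatMap, PySem.Dict.getD_foldl_modify_add_one]
  have hempty : (PySem.Dict.empty : PySem.Dict (List Char) Int).getD p 0 = 0 := rfl
  rw [hempty, zero_add, List.count_flatMap]
  congr 1
  have hterm : ∀ w : String,
      (List.count p ∘ fun w : String => (List.range' 1 w.toList.length).map (fun i => w.toList.take i)) w
        = if (fun w : String => decide (p <+: w.toList)) w = true then 1 else 0 := by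
    intro w
    simp only [Function.comp]
    rw [pv_count_prefixes]
    simp [hp]
  rw [List.map_congr_left (fun w _ => hterm w), pv_sum_ite_eq_countP]
  unfold pvCnt
  rw [List.countP_map]
  rfl

-- the sandwich lemma: in lexicographic order, words sharing a prefix are contiguous
theorem pv_sandwich : ∀ (p a c w : List Char), ¬ c < a → ¬ w < c →
    p <+: a → p <+: w → p <+: c := by
  intro p
  induction p with
  | nil => intro a c w _ _ _ _; exact List.nil_prefix
  | cons x p' ih =>
    intro a c w hca hwc hpa hpw
    obtain ⟨ta, hta⟩ := hpa
    obtain ⟨tw, htw⟩ := hpw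
    subst hta htw
    match c with
    | [] => exact absurd (List.nil_lt_cons x _) hca
    | y :: c' =>
      rcases lt_trichotomy x y with hxy | hxy | hxy
      · exact absurd (List.cons_lt_cons_iff.mpr (Or.inl hxy)) hwc
      · subst hxy
        have h1 : ¬ c' < p' ++ ta := fun h =>
          hca (List.cons_lt_cons_iff.mpr (Or.inr ⟨rfl, h⟩))
        have h2 : ¬ p' ++ tw < c' := fun h =>
          hwc (List.cons_lt_cons_iff.mpr (Or.inr ⟨rfl, h⟩))
        have hrec := ih (p' ++ ta) c' (p' ++ tw) h1 h2
          (List.prefix_append _ _) (List.prefix_append _ _)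
        exact List.cons_prefix_cons.mpr ⟨rfl, hrec⟩
      · exact absurd (List.cons_lt_cons_iff.mpr (Or.inl hxy)) hca

theorem pv_mem_inner (w1 w2 p : List Char) :
    ∀ (m j : ℕ) (s : PySem.Set (List Char)), 1 ≤ j → j + m = min w1.length w2.length + 1 →
      (p ∈ pvInnerA w1 w2 s (List.range' j m) ↔
        p ∈ s ∨ ∃ i, j ≤ i ∧ i ≤ min w1.length w2.length ∧ w1.take i = w2.take i ∧ p = w1.take i) := by
  intro m
  induction m with
  | zero =>
    intro j s hj hjm
    show p ∈ pvInnerA w1 w2 s [] ↔ _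
    simp only [pvInnerA]
    constructor
    · exact Or.inl
    · rintro (h | ⟨i, h1, h2, _, _⟩)
      · exact h
      · omega
  | succ m ih =>
    intro j s hj hjm
    rw [List.range'_succ]
    simp only [pvInnerA]
    by_cases hEq : w1.take j = w2.take j
    · rw [if_pos hEq, ih (j + 1) _ (by omega) (by omega), PySem.Set.mem_add]
      constructor
      · rintro ((h | h) | ⟨i, h1, h2, h3, h4⟩)
        · exact Or.inl h
        · exact Or.inr ⟨j, le_refl j, by omega, hEq, h⟩
        · exact Or.inr ⟨i, by omega, h2, h3, h4⟩
      · rintro (h | ⟨i, h1, h2, h3, h4⟩)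
        · exact Or.inl (Or.inl h)
        · rcases eq_or_lt_of_le h1 with rfl | hlt
          · exact Or.inl (Or.inr h4)
          · exact Or.inr ⟨i, by omega, h2, h3, h4⟩
    · rw [if_neg hEq]
      constructor
      · exact Or.inl
      · rintro (h | ⟨i, h1, h2, h3, _⟩)
        · exact h
        · exfalso
          apply hEq
          calc w1.take j = (w1.take i).take j := by
                rw [List.take_take, Nat.min_eq_left h1]
            _ = (w2.take i).take j := by rw [h3]
            _ = w2.take j := by rw [List.take_take, Nat.min_eq_left h1]

theorem pv_mem_inner_full (w1 w2 : List Char) (p : List Char) (s : PySem.Set (List Char)) :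
    p ∈ pvInnerA w1 w2 s (List.range' 1 (min w1.length w2.length)) ↔
      p ∈ s ∨ (p ≠ [] ∧ p <+: w1 ∧ p <+: w2) := by
  rw [pv_mem_inner w1 w2 p (min w1.length w2.length) 1 s le_rfl (by omega)]
  refine or_congr Iff.rfl ?_
  constructor
  · rintro ⟨i, h1, h2, h3, rfl⟩
    refine ⟨?_, List.take_prefix i w1, ?_⟩
    · apply List.ne_nil_of_length_pos
      rw [List.length_take]
      omega
    · rw [h3]; exact List.take_prefix i w2
  · rintro ⟨hne, h1, h2⟩
    have hl1 := h1.length_le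
    have hl2 := h2.length_le
    refine ⟨p.length, List.length_pos_of_ne_nil hne, by omega, ?_, List.prefix_iff_eq_take.mp h1⟩
    rw [← List.prefix_iff_eq_take.mp h1, ← List.prefix_iff_eq_take.mp h2]

theorem pv_mem_build (p : List Char) :
    ∀ (lws : List (List Char)), List.Pairwise (fun a b => ¬ b < a) lws →
      ∀ (s : PySem.Set (List Char)),
        (p ∈ pvBuildA s lws ↔ p ∈ s ∨ (p ≠ [] ∧ 2 ≤ pvCnt p lws)) := by
  intro lws
  induction lws with
  | nil =>
    intro _ s
    simp only [pvBuildA, pvCnt, List.countP_nil]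
    constructor
    · exact Or.inl
    · rintro (h | ⟨_, h2⟩)
      · exact h
      · omega
  | cons a t ih =>
    cases t with
    | nil =>
      intro _ s
      simp only [pvBuildA, pvCnt]
      constructor
      · exact Or.inl
      · rintro (h | ⟨_, h2⟩)
        · exact h
        · exfalso
          have hle := List.countP_le_length (p := fun w => decide (p <+: w)) (l := [a])
          simp only [List.length_cons, List.length_nil] at hle
          omega
    | cons b r =>
      intro hpw s
      obtain ⟨hab, htail⟩ := List.pairwise_cons.mp hpw
      simp only [pvBuildA]
      rw [ih htail _, pv_mem_inner_full]
      unfold pvCnt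
      rw [List.countP_cons (a := a)]
      constructor
      · rintro ((h | ⟨hne, h1, h2⟩) | ⟨hne, hc⟩)
        · exact Or.inl h
        · refine Or.inr ⟨hne, ?_⟩
          have hb : 0 < List.countP (fun w => decide (p <+: w)) (b :: r) :=
            List.countP_pos_iff.mpr ⟨b, List.mem_cons_self, by simpa using h2⟩
          have ha : (if decide (p <+: a) = true then 1 else 0) = 1 := by
            simp [h1]
          omega
        · refine Or.inr ⟨hne, ?_⟩
          have ha : (0:ℕ) ≤ if decide (p <+: a) = true then 1 else 0 := by
            split <;> omega
          omega
      · rintro (h | ⟨hne, hc⟩)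
        · exact Or.inl (Or.inl h)
        · by_cases hpa : p <+: a
          · have h1 : 0 < List.countP (fun w => decide (p <+: w)) (b :: r) := by
              have ha : (if decide (p <+: a) = true then 1 else 0) ≤ 1 := by
                split <;> omega
              omega
            obtain ⟨v, hvmem, hvp⟩ := List.countP_pos_iff.mp h1
            have hpv : p <+: v := by simpa using hvp
            have hpb : p <+: b := by
              rcases List.mem_cons.mp hvmem with rfl | hvr
              · exact hpv
              · exact pv_sandwich p a b v (hab b List.mem_cons_self)
                  ((List.pairwise_cons.mp htail).1 v hvr) hpa hpv
            exact Or.inl (Or.inr ⟨hne, hpa, hpb⟩)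
          · have ha : (if decide (p <+: a) = true then 1 else 0) = 0 := by
              simp [hpa]
            exact Or.inr ⟨hne, by omega⟩

theorem pv_cost_eq (ps : PySem.Set (List Char)) (d : PySem.Dict (List Char) Int)
    (C : List Char → ℕ) (w : List Char)
    (hS : ∀ q, q ∈ ps ↔ q ≠ [] ∧ 2 ≤ C q)
    (hD : ∀ q, q ≠ [] → d.getD q 0 = (C q : Int))
    (hw : ∀ i, 1 ≤ i → i ≤ w.length → 1 ≤ C (w.take i)) :
    ∀ (m j : ℕ), 1 ≤ j → j + m = w.length + 1 →
      pvFirstB d w (List.range' j m) = (j : Int) - 1 + pvCostA ps w (List.range' j m) := by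
  intro m
  induction m with
  | zero =>
    intro j hj hjm
    show pvFirstB d w [] = (j : Int) - 1 + pvCostA ps w []
    simp only [pvFirstB, pvCostA]
    have : j = w.length + 1 := by omega
    subst this
    push_cast
    ring
  | succ m ih =>
    intro j hj hjm
    rw [List.range'_succ]
    simp only [pvFirstB, pvCostA]
    have hjw : j ≤ w.length := by omega
    have hne : w.take j ≠ [] := by
      apply List.ne_nil_of_length_pos
      rw [List.length_take]
      omega
    have hC1 : 1 ≤ C (w.take j) := hw j hj hjw
    have hBcond : (d.getD (w.take j) 0 == 1) = decide (C (w.take j) = 1) := by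
      rw [hD _ hne]
      by_cases hcq : C (w.take j) = 1
      · simp [hcq]
      · simp [Nat.cast_eq_one, hcq]
    rw [hBcond]
    by_cases hc : C (w.take j) = 1
    · rw [if_pos (by simp [hc]), if_neg (by
        rw [hS]
        rintro ⟨_, h2⟩
        omega)]
      omega
    · rw [if_neg (by simp [hc]), if_pos (by
        rw [hS]
        exact ⟨hne, by omega⟩), ih (j + 1) (by omega) (by omega)]
      push_cast
      ring

-- ===== VERDICT (by name: the statement is the Claim_ definition above) =====
theorem solution_spec : Claim_equal_solution := by
  intro words _
  show solution words = solution_alt words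
  simp only [solution, solution_alt]
  have hperm : (PySem.List.sorted words id false).Perm words :=
    PySem.List.sorted_perm words id false
  have hpair : List.Pairwise (fun a b : List Char => ¬ b < a)
      ((PySem.List.sorted words id false).map String.toList) := by
    refine List.Pairwise.map _ ?_ (PySem.List.sorted_pairwise words id)
    intro a b hab hlt
    exact absurd hlt (not_lt.mpr (String.le_iff_toList_le.mp hab))
  have hS : ∀ q, q ∈ pvBuildA PySem.Set.empty ((PySem.List.sorted words id false).map String.toList)
      ↔ q ≠ [] ∧ 2 ≤ pvCnt q (words.map String.toList) := by
    intro q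
    rw [pv_mem_build q _ hpair PySem.Set.empty]
    have hcnt : pvCnt q ((PySem.List.sorted words id false).map String.toList)
        = pvCnt q (words.map String.toList) := (hperm.map String.toList).countP_eq _
    rw [hcnt]
    have hempty : q ∉ (PySem.Set.empty : PySem.Set (List Char)) := by
      simp [PySem.Set.empty]
    tauto
  have hD : ∀ q, q ≠ [] →
      (words.foldl (fun d w => pvCountB d w.toList) PySem.Dict.empty).getD q 0
        = (pvCnt q (words.map String.toList) : Int) :=
    fun q hq => pv_getD_built words q hq
  have hword : ∀ w ∈ words,
      pvFirstB (words.foldl (fun d w => pvCountB d w.toList) PySem.Dict.empty)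
          w.toList (List.range' 1 w.toList.length)
        = pvCostA (pvBuildA PySem.Set.empty ((PySem.List.sorted words id false).map String.toList))
            w.toList (List.range' 1 w.toList.length) := by
    intro w hwmem
    have hmem : w.toList ∈ words.map String.toList := List.mem_map_of_mem hwmem
    have hwc : ∀ i, 1 ≤ i → i ≤ w.toList.length →
        1 ≤ pvCnt (w.toList.take i) (words.map String.toList) := by
      intro i _ _
      exact List.countP_pos_iff.mpr ⟨w.toList, hmem, by simp [List.take_prefix]⟩
    have := pv_cost_eq _ _ _ w.toList hS hD hwc w.toList.length 1 le_rfl (by omega)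
    rw [this]
    push_cast
    ring
  rw [PySem.List.foldl_add, PySem.List.foldl_add, zero_add, zero_add,
    List.map_congr_left hword]
  exact List.Perm.sum_eq (List.Perm.map
    (fun w : String => pvCostA
      (pvBuildA PySem.Set.empty ((PySem.List.sorted words id false).map String.toList))
      w.toList (List.range' 1 w.toList.length)) hperm)
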